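-- pv_equiv track=rewrite | github.com/allyssonifx/algoritmos | grafos/felipe.py | count_seqs
-- ===== SOURCE A (Python) =====
-- def count_seqs(N, K):
--     MOD = 10**9 + 7
--     memo = [[0] * (N+1) for _ in range(K+1)]
--     for n in range(1, N+1):
--         memo[1][n] = 1
--
--     for k in range(2, K+1):
--         for n in range(1, N+1):
--             for d in range(1, n+1):
--                 if n % d == 0:
--                     memo[k][n] = (memo[k][n] + memo[k-1][d]) % MOD
--
--     return sum(memo[K]) % MOD
-- ===== SOURCE B (Python) =====
-- def count_seqs(N, K):
--     # Sieve-style DP: for each d, add cur[d] into every multiple of d,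
--     # instead of scanning all candidate divisors of every n.
--     MOD = 10**9 + 7
--     cur = [0] * (N+1)
--     for n in range(1, N+1):
--         cur[n] = 1
--     for k in range(2, K+1):
--         new = [0] * (N+1)
--         for d in range(1, N+1):
--             for m in range(d, N+1, d):
--                 new[m] = (new[m] + cur[d]) % MOD
--         cur = new
--     return sum(cur) % MOD
-- ===== Notes on version B (the rewrite author's own statement) =====
-- stated objective: faster
-- what changed: Replaces the per-n scan over all candidate divisors d in 1..n by a sieve: for each d it adds cur[d] into every multiple of d, keeping only one DP row instead of the full K x (N+1) table; intended as faster (measured ~10x at the largest size both finished).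
import Mathlib
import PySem

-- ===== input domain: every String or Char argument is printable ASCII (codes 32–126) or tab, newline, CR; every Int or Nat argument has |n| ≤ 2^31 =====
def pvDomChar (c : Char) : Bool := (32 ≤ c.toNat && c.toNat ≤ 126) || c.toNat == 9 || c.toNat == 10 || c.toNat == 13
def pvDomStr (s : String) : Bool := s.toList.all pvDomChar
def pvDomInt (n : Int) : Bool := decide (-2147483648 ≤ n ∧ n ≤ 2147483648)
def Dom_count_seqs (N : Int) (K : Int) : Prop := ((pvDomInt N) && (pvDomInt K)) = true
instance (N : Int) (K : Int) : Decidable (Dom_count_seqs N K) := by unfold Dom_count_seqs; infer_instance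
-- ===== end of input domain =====

-- B replaces A's per-n divisor scan by a sieve over multiples keeping a single DP row; intended as faster (measured ~10x in a timing run at the largest size both finished).

-- ===== PORT A =====
-- memo[i][j] read/write; all indices used by A are ≥ 0 and in range on admitted inputs, where .toNat is exact
def pvGet2 (m : Array (Array Int)) (i j : Int) : Int :=
  (m.getD i.toNat #[]).getD j.toNat 0

def pvSet2 (m : Array (Array Int)) (i j : Int) (v : Int) : Array (Array Int) :=
  m.modify i.toNat (fun row => row.setIfInBounds j.toNat v)

def count_seqs (N : Int) (K : Int) : Int :=
  let MOD : Int := 10 ^ 9 + 7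
  let memo : Array (Array Int) := Array.replicate (K+1).toNat (Array.replicate (N+1).toNat 0)
  let memo := (PySem.List.pyRange 1 (N+1) 1).foldl (fun m n => pvSet2 m 1 n 1) memo
  let memo := (PySem.List.pyRange 2 (K+1) 1).foldl (fun m k =>
    (PySem.List.pyRange 1 (N+1) 1).foldl (fun m n =>
      (PySem.List.pyRange 1 (n+1) 1).foldl (fun m d =>
        if PySem.Int.mod n d == 0 then
          pvSet2 m k n (PySem.Int.mod (pvGet2 m k n + pvGet2 m (k-1) d) MOD)
        else m) m) m) memo
  PySem.Int.mod ((memo.getD K.toNat #[]).foldl (· + ·) 0) MOD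

-- ===== PORT B =====
def count_seqs_alt (N : Int) (K : Int) : Int :=
  let MOD : Int := 10 ^ 9 + 7
  let cur : Array Int := Array.replicate (N+1).toNat 0
  let cur := (PySem.List.pyRange 1 (N+1) 1).foldl (fun c n => c.setIfInBounds n.toNat 1) cur
  let cur := (PySem.List.pyRange 2 (K+1) 1).foldl (fun c _k =>
    (PySem.List.pyRange 1 (N+1) 1).foldl (fun nw d =>
      (PySem.List.pyRange d (N+1) d).foldl (fun nw m =>
        nw.setIfInBounds m.toNat (PySem.Int.mod (nw.getD m.toNat 0 + c.getD d.toNat 0) MOD)) nw)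
      (Array.replicate (N+1).toNat 0)) cur
  PySem.Int.mod (cur.foldl (· + ·) 0) MOD

-- ===== PRECONDITION & SPEC =====
-- Pre_ excludes exactly the inputs on which A raises IndexError: K < 0 (row memo[K] missing),
-- and K = 0 with N ≥ 1 (A writes to the absent row memo[1]).
def Pre_count_seqs (N : Int) (K : Int) : Prop := 1 ≤ K ∨ (K = 0 ∧ N ≤ 0)
instance (N : Int) (K : Int) : Decidable (Pre_count_seqs N K) := by unfold Pre_count_seqs; infer_instance

def pvWitness_count_seqs : Int × Int := (5, 3)

def Spec_count_seqs (N : Int) (K : Int) (out : Int) : Prop := out = count_seqs_alt N K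
instance (N : Int) (K : Int) (out : Int) : Decidable (Spec_count_seqs N K out) := by unfold Spec_count_seqs; infer_instance

-- ===== CLAIM (what is proved, stated in full; the proofs are below) =====
def Claim_equal_count_seqs : Prop := ∀ (N : Int) (K : Int), Dom_count_seqs N K → Pre_count_seqs N K → Spec_count_seqs N K (count_seqs N K)

-- ===== LEMMAS AND PROOFS =====

-- pure model of the DP: pvRow1 = row for k = 1, pvRowN = one row-to-row step, pvIter t = row for k = t+1
def pvDF (p : Array Int) (n : Int) (a0 : Int) : Int :=
  (PySem.List.pyRange 1 (n+1) 1).foldl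
    (fun a d => if PySem.Int.mod n d == 0 then PySem.Int.mod (a + p.getD d.toNat 0) (10 ^ 9 + 7) else a) a0

def pvRowN (N : Int) (p : Array Int) : Array Int :=
  (PySem.List.pyRange 1 (N+1) 1).foldl
    (fun r n => r.setIfInBounds n.toNat (pvDF p n (r.getD n.toNat 0))) (Array.replicate (N+1).toNat 0)

def pvRow1 (N : Int) : Array Int :=
  (PySem.List.pyRange 1 (N+1) 1).foldl (fun c n => c.setIfInBounds n.toNat 1) (Array.replicate (N+1).toNat 0)

def pvIter (N : Int) : Nat → Array Int
  | 0 => pvRow1 N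
  | t+1 => pvRowN N (pvIter N t)

-- basic list-cell lemmas
theorem pvAGetD_eq {α : Type} (a : Array α) (i : Nat) (d : α) : a.getD i d = (a[i]?).getD d := by
  unfold Array.getD
  split
  · rename_i h
    rw [Array.getElem?_eq_getElem h]
    rfl
  · rename_i h
    rw [Array.getElem?_eq_none (by omega)]
    rfl

theorem pvGetD_set_self {α : Type} (l : Array α) (i : Nat) (v d : α) (h : i < l.size) :
    (l.setIfInBounds i v).getD i d = v := by
  rw [pvAGetD_eq, Array.getElem?_setIfInBounds]
  simp [h]

theorem pvGetD_set_ne {α : Type} (l : Array α) (i j : Nat) (v d : α) (h : i ≠ j) :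
    (l.setIfInBounds i v).getD j d = l.getD j d := by
  rw [pvAGetD_eq, pvAGetD_eq, Array.getElem?_setIfInBounds]
  simp [h]

theorem pvSetGetD {α : Type} (l : Array α) (i : Nat) (d : α) (h : i < l.size) :
    l.setIfInBounds i (l.getD i d) = l := by
  apply Array.ext (by simp)
  intro k h1 h2
  rw [Array.getElem_setIfInBounds]
  split
  · simp_all [Array.getD]
  · rfl

theorem pvSet2_eq (m : Array (Array Int)) (i j : Int) (v : Int) :
    pvSet2 m i j v = m.setIfInBounds i.toNat ((m.getD i.toNat #[]).setIfInBounds j.toNat v) := by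
  unfold pvSet2
  apply Array.ext (by rw [Array.size_modify, Array.size_setIfInBounds])
  intro k h1 h2
  rw [Array.size_modify] at h1
  rw [Array.getElem_modify, Array.getElem_setIfInBounds]
  by_cases he : i.toNat = k
  · subst he
    rw [if_pos rfl, if_pos rfl]
    have hg : m.getD i.toNat #[] = m[i.toNat] := by
      unfold Array.getD
      rw [dif_pos h1]
      rfl
    rw [hg]
  · rw [if_neg he, if_neg he]

theorem pvFoldLen {α : Type} (f : Array Int → α → Array Int)
    (h : ∀ r x, (f r x).size = r.size) :
    ∀ (L : List α) (r : Array Int), (L.foldl f r).size = r.size := by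
  intro L
  induction L with
  | nil => intro r; rfl
  | cons x T ih => intro r; rw [List.foldl_cons, ih, h]

theorem pvFoldFix {α β : Type} (L : List α) (f : β → α → β) (a : β)
    (h : ∀ b x, x ∈ L → f b x = b) : L.foldl f a = a := by
  induction L generalizing a with
  | nil => rfl
  | cons x T ih =>
    rw [List.foldl_cons, h a x (by simp), ih]
    intro b y hy; exact h b y (by simp [hy])

theorem pvNodupPos (a b s : Int) (hs : 0 < s) : (PySem.List.pyRange a b s).Nodup := by
  rw [PySem.List.pyRange_of_pos a b hs]
  refine List.Nodup.map ?_ List.nodup_range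
  intro x y hxy
  have h1 : s * (x : Int) = s * (y : Int) := by
    have := add_left_cancel hxy
    exact this
  exact_mod_cast mul_left_cancel₀ (ne_of_gt hs) h1

-- a fold of single-cell updates at distinct non-negative in-range indices, read pointwise
theorem pvMaster (u : Int → Int → Int) :
    ∀ (L : List Int) (r : Array Int), L.Nodup → (∀ m ∈ L, 0 ≤ m ∧ m.toNat < r.size) →
    ∀ j : Nat,
      (L.foldl (fun r m => r.setIfInBounds m.toNat (u m (r.getD m.toNat 0))) r).getD j 0
        = if (j : Int) ∈ L then u j (r.getD j 0) else r.getD j 0 := by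
  intro L
  induction L with
  | nil => intro r _ _ j; simp
  | cons m T ih =>
    intro r hnd hb j
    obtain ⟨hm0, hml⟩ := hb m (by simp)
    rw [List.foldl_cons]
    rw [ih _ (List.nodup_cons.mp hnd).2
      (fun x hx => ⟨(hb x (by simp [hx])).1, by rw [Array.size_setIfInBounds]; exact (hb x (by simp [hx])).2⟩)]
    by_cases hj : j = m.toNat
    · subst hj
      have hjm : (m.toNat : Int) = m := Int.toNat_of_nonneg hm0
      have hjT : (m.toNat : Int) ∉ T := by rw [hjm]; exact (List.nodup_cons.mp hnd).1
      rw [if_neg hjT, if_pos (by rw [hjm]; exact List.mem_cons_self ..)]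
      rw [pvGetD_set_self _ _ _ _ hml, hjm]
    · have hne : (j : Int) ≠ m := fun h => hj (by omega)
      rw [pvGetD_set_ne _ _ _ _ _ (fun h => hj h.symm)]
      simp [List.mem_cons, hne]

-- A's inner divisor loop accumulates in the single cell memo[k][n]
theorem pvDloop (ds : List Int) (k n : Int) (m : Array (Array Int))
    (hk : k.toNat < m.size) (hn : n.toNat < (m.getD k.toNat #[]).size)
    (hne : (k-1).toNat ≠ k.toNat) :
    ds.foldl (fun m d =>
        if PySem.Int.mod n d == 0 then
          pvSet2 m k n (PySem.Int.mod (pvGet2 m k n + pvGet2 m (k-1) d) (10 ^ 9 + 7))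
        else m) m
      = pvSet2 m k n (ds.foldl
          (fun a d => if PySem.Int.mod n d == 0 then PySem.Int.mod (a + pvGet2 m (k-1) d) (10 ^ 9 + 7) else a)
          (pvGet2 m k n)) := by
  induction ds generalizing m with
  | nil =>
    rw [List.foldl_nil, List.foldl_nil]
    simp only [pvSet2_eq]
    unfold pvGet2
    rw [pvSetGetD _ _ _ hn, pvSetGetD _ _ _ hk]
  | cons d T ih =>
    rw [List.foldl_cons, List.foldl_cons]
    by_cases hc : PySem.Int.mod n d == 0
    · rw [if_pos hc, if_pos hc]
      set v1 := PySem.Int.mod (pvGet2 m k n + pvGet2 m (k-1) d) (10 ^ 9 + 7) with hv1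
      have hk' : k.toNat < (pvSet2 m k n v1).size := by
        rw [pvSet2_eq, Array.size_setIfInBounds]; exact hk
      have hrow' : (pvSet2 m k n v1).getD k.toNat #[] = (m.getD k.toNat #[]).setIfInBounds n.toNat v1 := by
        rw [pvSet2_eq]; rw [pvGetD_set_self _ _ _ _ hk]
      have hn' : n.toNat < ((pvSet2 m k n v1).getD k.toNat #[]).size := by
        rw [hrow', Array.size_setIfInBounds]; exact hn
      rw [ih _ hk' hn']
      have hget : ∀ d' : Int, pvGet2 (pvSet2 m k n v1) (k-1) d' = pvGet2 m (k-1) d' := by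
        intro d'
        unfold pvGet2
        rw [pvSet2_eq, pvGetD_set_ne _ _ _ _ _ (fun h => hne h.symm)]
      have hcell : pvGet2 (pvSet2 m k n v1) k n = v1 := by
        unfold pvGet2
        rw [hrow', pvGetD_set_self _ _ _ _ hn]
      simp only [hget, hcell]
      have hset : ∀ w : Int, pvSet2 (pvSet2 m k n v1) k n w = pvSet2 m k n w := by
        intro w
        rw [pvSet2_eq (pvSet2 m k n v1), hrow', Array.setIfInBounds_setIfInBounds,
          pvSet2_eq, pvSet2_eq, Array.setIfInBounds_setIfInBounds]
      rw [hset]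
    · rw [if_neg (by simpa using hc), if_neg (by simpa using hc)]
      exact ih _ hk hn

-- A's loop body for one k only rewrites row k, from row k-1
theorem pvKstep (Lns : List Int) (k N : Int) (m : Array (Array Int))
    (hk : k.toNat < m.size) (hrow : (m.getD k.toNat #[]).size = (N+1).toNat)
    (hne : (k-1).toNat ≠ k.toNat) (hL : ∀ n ∈ Lns, 0 ≤ n ∧ n.toNat < (N+1).toNat) :
    Lns.foldl (fun m n =>
        (PySem.List.pyRange 1 (n+1) 1).foldl (fun m d =>
          if PySem.Int.mod n d == 0 then
            pvSet2 m k n (PySem.Int.mod (pvGet2 m k n + pvGet2 m (k-1) d) (10 ^ 9 + 7))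
          else m) m) m
      = m.setIfInBounds k.toNat (Lns.foldl
          (fun r n => r.setIfInBounds n.toNat (pvDF (m.getD (k-1).toNat #[]) n (r.getD n.toNat 0)))
          (m.getD k.toNat #[])) := by
  induction Lns generalizing m with
  | nil => rw [List.foldl_nil, List.foldl_nil, pvSetGetD _ _ _ hk]
  | cons n T ih =>
    rw [List.foldl_cons, List.foldl_cons]
    have hn : n.toNat < (m.getD k.toNat #[]).size := by rw [hrow]; exact (hL n (by simp)).2
    rw [pvDloop _ k n m hk hn hne]
    have hv : ((PySem.List.pyRange 1 (n+1) 1).foldl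
        (fun a d => if PySem.Int.mod n d == 0 then PySem.Int.mod (a + pvGet2 m (k-1) d) (10 ^ 9 + 7) else a)
        (pvGet2 m k n))
        = pvDF (m.getD (k-1).toNat #[]) n ((m.getD k.toNat #[]).getD n.toNat 0) := rfl
    rw [hv]
    set v1 := pvDF (m.getD (k-1).toNat #[]) n ((m.getD k.toNat #[]).getD n.toNat 0) with hv1
    have hk' : k.toNat < (pvSet2 m k n v1).size := by
      rw [pvSet2_eq, Array.size_setIfInBounds]; exact hk
    have hrowset : (pvSet2 m k n v1).getD k.toNat #[] = (m.getD k.toNat #[]).setIfInBounds n.toNat v1 := by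
      rw [pvSet2_eq]; rw [pvGetD_set_self _ _ _ _ hk]
    have hrow' : ((pvSet2 m k n v1).getD k.toNat #[]).size = (N+1).toNat := by
      rw [hrowset, Array.size_setIfInBounds]; exact hrow
    have hprev' : (pvSet2 m k n v1).getD (k-1).toNat #[] = m.getD (k-1).toNat #[] := by
      rw [pvSet2_eq]
      rw [pvGetD_set_ne _ _ _ _ _ (fun h => hne h.symm)]
    rw [ih (pvSet2 m k n v1) hk' hrow' (fun x hx => hL x (by simp [hx]))]
    simp only [hprev', hrowset]
    rw [pvSet2_eq, Array.setIfInBounds_setIfInBounds]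

-- A's init loop writes only into row 1
theorem pvInit (L : List Int) (m : Array (Array Int)) (h1 : 1 < m.size) :
    L.foldl (fun m n => pvSet2 m 1 n 1) m
      = m.setIfInBounds 1 (L.foldl (fun r n => r.setIfInBounds n.toNat 1) (m.getD 1 #[])) := by
  induction L generalizing m with
  | nil => rw [List.foldl_nil, List.foldl_nil, pvSetGetD _ _ _ h1]
  | cons n T ih =>
    rw [List.foldl_cons, List.foldl_cons]
    have h1' : 1 < (pvSet2 m 1 n 1).size := by
      rw [pvSet2_eq, Array.size_setIfInBounds]; exact h1
    rw [ih (pvSet2 m 1 n 1) h1']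
    have hrowset : (pvSet2 m 1 n 1).getD 1 #[] = (m.getD 1 #[]).setIfInBounds n.toNat 1 := by
      rw [pvSet2_eq]; simp only [Int.toNat_one]; rw [pvGetD_set_self _ _ _ _ h1]
    rw [hrowset]
    rw [pvSet2_eq]
    simp only [Int.toNat_one]
    rw [Array.setIfInBounds_setIfInBounds]

theorem pvRowN_len (N : Int) (p : Array Int) : (pvRowN N p).size = (N+1).toNat := by
  unfold pvRowN
  rw [pvFoldLen _ (fun r x => Array.size_setIfInBounds ..)]
  simp

theorem pvGetD_replicate (n j : Nat) : (Array.replicate n (0:Int)).getD j 0 = 0 := by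
  rw [pvAGetD_eq, Array.getElem?_replicate]
  split <;> rfl

theorem pvEqOfGetD (r1 r2 : Array Int) (hl : r1.size = r2.size)
    (h : ∀ j : Nat, r1.getD j 0 = r2.getD j 0) : r1 = r2 := by
  apply Array.ext hl
  intro k h1 h2
  have hk := h k
  rwa [pvAGetD_eq, pvAGetD_eq, Array.getElem?_eq_getElem h1, Array.getElem?_eq_getElem h2] at hk

theorem pvBpoint (N : Int) (c : Array Int) :
    ∀ (ds : List Int), (∀ d ∈ ds, 1 ≤ d) → ∀ (nw : Array Int), nw.size = (N+1).toNat →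
    ∀ j : Nat,
      (ds.foldl (fun nw d =>
          (PySem.List.pyRange d (N+1) d).foldl (fun nw m =>
            nw.setIfInBounds m.toNat (PySem.Int.mod (nw.getD m.toNat 0 + c.getD d.toNat 0) (10 ^ 9 + 7))) nw) nw).getD j 0
        = ds.foldl (fun a d =>
            if (j : Int) ∈ PySem.List.pyRange d (N+1) d then PySem.Int.mod (a + c.getD d.toNat 0) (10 ^ 9 + 7) else a)
            (nw.getD j 0) := by
  intro ds
  induction ds with
  | nil => intro _ nw _ j; rfl
  | cons d T ih =>
    intro hds nw hnw j
    have hd1 : (1:Int) ≤ d := hds d (by simp)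
    rw [List.foldl_cons, List.foldl_cons]
    have hmas := pvMaster (fun _ v => PySem.Int.mod (v + c.getD d.toNat 0) (10 ^ 9 + 7))
      (PySem.List.pyRange d (N+1) d) nw (pvNodupPos d (N+1) d (by omega))
      (fun m hm => by
        have := (PySem.List.mem_pyRange_iff_of_pos (by omega) m).mp hm
        constructor
        · omega
        · rw [hnw]; omega)
      j
    have hinlen : ((PySem.List.pyRange d (N+1) d).foldl (fun nw m =>
        nw.setIfInBounds m.toNat (PySem.Int.mod (nw.getD m.toNat 0 + c.getD d.toNat 0) (10 ^ 9 + 7))) nw).size = (N+1).toNat := by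
      rw [pvFoldLen _ (fun r x => Array.size_setIfInBounds ..)]; exact hnw
    rw [ih (fun x hx => hds x (by simp [hx])) _ hinlen j, hmas]

-- B's sieve step equals the pure divisor-fold row step
theorem pvRowNPoint (N : Int) (c : Array Int) (j : Nat) :
    (pvRowN N c).getD j 0
      = if (j : Int) ∈ PySem.List.pyRange 1 (N+1) 1 then pvDF c j 0 else (0:Int) := by
  unfold pvRowN
  rw [pvMaster (fun n v => pvDF c n v) (PySem.List.pyRange 1 (N+1) 1) _
    (PySem.List.nodup_pyRange_one 1 (N+1))
    (fun m hm => by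
      have := (PySem.List.mem_pyRange_one).mp hm
      constructor
      · omega
      · rw [Array.size_replicate]; omega)
    j]
  rw [pvGetD_replicate]

theorem pvStepB (N : Int) (c : Array Int) :
    (PySem.List.pyRange 1 (N+1) 1).foldl (fun nw d =>
        (PySem.List.pyRange d (N+1) d).foldl (fun nw m =>
          nw.setIfInBounds m.toNat (PySem.Int.mod (nw.getD m.toNat 0 + c.getD d.toNat 0) (10 ^ 9 + 7))) nw)
      (Array.replicate (N+1).toNat 0)
      = pvRowN N c := by
  have hlenL : ((PySem.List.pyRange 1 (N+1) 1).foldl (fun nw d =>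
      (PySem.List.pyRange d (N+1) d).foldl (fun nw m =>
        nw.setIfInBounds m.toNat (PySem.Int.mod (nw.getD m.toNat 0 + c.getD d.toNat 0) (10 ^ 9 + 7))) nw)
      (Array.replicate (N+1).toNat 0)).size = (N+1).toNat := by
    rw [pvFoldLen _ (fun nw d => pvFoldLen _ (fun r x => Array.size_setIfInBounds ..) _ nw)]
    simp
  apply pvEqOfGetD _ _ (by rw [hlenL, pvRowN_len])
  intro j
  rw [pvBpoint N c _ (fun d hd => ((PySem.List.mem_pyRange_one).mp hd).1) _ (by simp) j]
  rw [pvRowNPoint N c j, pvGetD_replicate]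
  by_cases hj : (j : Int) ∈ PySem.List.pyRange 1 (N+1) 1
  · rw [if_pos hj]
    obtain ⟨hj1, hj2⟩ := (PySem.List.mem_pyRange_one).mp hj
    rw [PySem.List.pyRange_one_append 1 ((j:Int)+1) (N+1) (by omega) (by omega), List.foldl_append]
    have htail : ∀ (a : Int) (d : Int), d ∈ PySem.List.pyRange ((j:Int)+1) (N+1) 1 →
        (if (j : Int) ∈ PySem.List.pyRange d (N+1) d then PySem.Int.mod (a + c.getD d.toNat 0) (10 ^ 9 + 7) else a) = a := by
      intro a d hd
      obtain ⟨hd1, hd2⟩ := (PySem.List.mem_pyRange_one).mp hd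
      rw [if_neg]
      intro hmem
      have := (PySem.List.mem_pyRange_iff_of_pos (by omega) ((j:Int))).mp hmem
      omega
    rw [pvFoldFix _ _ _ htail]
    unfold pvDF
    apply PySem.List.foldl_congr_mem
    intro a d hd
    obtain ⟨hd1, hd2⟩ := (PySem.List.mem_pyRange_one).mp hd
    have hdvd : ((j : Int) ∈ PySem.List.pyRange d (N+1) d) ↔ (PySem.Int.mod (j:Int) d == 0) = true := by
      rw [PySem.List.mem_pyRange_iff_of_pos (by omega) ((j:Int))]
      rw [beq_iff_eq, PySem.Int.mod_eq_zero_iff_dvd]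
      constructor
      · rintro ⟨-, -, h3⟩
        simpa using h3.add (dvd_refl d)
      · intro h
        refine ⟨?_, by omega, by simpa using h.sub (dvd_refl d)⟩
        exact Int.le_of_dvd (by omega) h
    by_cases hc : (PySem.Int.mod (j:Int) d == 0) = true
    · rw [if_pos (hdvd.mpr hc), if_pos hc]
    · rw [if_neg (fun h => hc (hdvd.mp h)), if_neg hc]
  · rw [if_neg hj]
    apply pvFoldFix
    intro a d hd
    obtain ⟨hd1, hd2⟩ := (PySem.List.mem_pyRange_one).mp hd
    rw [if_neg]
    intro hmem
    have := (PySem.List.mem_pyRange_iff_of_pos (by omega) ((j:Int))).mp hmem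
    exact hj ((PySem.List.mem_pyRange_one).mpr (by omega))

-- the k-loops of A and B both iterate the pure row step
theorem pvLoopB (N K : Int) :
    ∀ (t : Nat) (a : Int), 2 ≤ a → a ≤ K + 1 → (K + 1 - a).toNat = t →
    (PySem.List.pyRange a (K+1) 1).foldl (fun c (_k : Int) =>
        (PySem.List.pyRange 1 (N+1) 1).foldl (fun nw d =>
          (PySem.List.pyRange d (N+1) d).foldl (fun nw m =>
            nw.setIfInBounds m.toNat (PySem.Int.mod (nw.getD m.toNat 0 + c.getD d.toNat 0) (10 ^ 9 + 7))) nw)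
          (Array.replicate (N+1).toNat 0)) (pvIter N (a-2).toNat)
      = pvIter N (K-1).toNat := by
  intro t
  induction t with
  | zero =>
    intro a h2 hle ht
    have ha : a = K + 1 := by omega
    subst ha
    rw [PySem.List.pyRange_one_eq_nil (le_refl _), List.foldl_nil]
    congr 1
    omega
  | succ t ih =>
    intro a h2 hle ht
    rw [PySem.List.pyRange_one_cons (by omega : a < K + 1), List.foldl_cons]
    rw [pvStepB N (pvIter N (a-2).toNat)]
    have hit : pvRowN N (pvIter N (a-2).toNat) = pvIter N ((a+1)-2).toNat := by
      have h : ((a+1)-2).toNat = (a-2).toNat + 1 := by omega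
      rw [h]
      rfl
    rw [hit]
    exact ih (a+1) (by omega) (by omega) (by omega)

theorem pvLoopA (N K : Int) :
    ∀ (t : Nat) (a : Int), 2 ≤ a → a ≤ K + 1 → (K + 1 - a).toNat = t →
    ∀ m : Array (Array Int), m.size = (K+1).toNat →
      m.getD (a-1).toNat #[] = pvIter N (a-2).toNat →
      (∀ j : Int, a ≤ j → j ≤ K → m.getD j.toNat #[] = Array.replicate (N+1).toNat 0) →
      ((PySem.List.pyRange a (K+1) 1).foldl (fun m k =>
          (PySem.List.pyRange 1 (N+1) 1).foldl (fun m n =>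
            (PySem.List.pyRange 1 (n+1) 1).foldl (fun m d =>
              if PySem.Int.mod n d == 0 then
                pvSet2 m k n (PySem.Int.mod (pvGet2 m k n + pvGet2 m (k-1) d) (10 ^ 9 + 7))
              else m) m) m) m).getD K.toNat #[]
        = pvIter N (K-1).toNat := by
  intro t
  induction t with
  | zero =>
    intro a h2 hle ht m hlen hprev hz
    have ha : a = K + 1 := by omega
    subst ha
    rw [PySem.List.pyRange_one_eq_nil (le_refl _), List.foldl_nil]
    have h1 : K.toNat = ((K+1)-1).toNat := by omega
    rw [h1, hprev]
    congr 1
    omega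
  | succ t ih =>
    intro a h2 hle ht m hlen hprev hz
    rw [PySem.List.pyRange_one_cons (by omega : a < K + 1), List.foldl_cons]
    have hk : a.toNat < m.size := by rw [hlen]; omega
    have hza : m.getD a.toNat #[] = Array.replicate (N+1).toNat 0 := hz a (le_refl _) (by omega)
    have hrow : (m.getD a.toNat #[]).size = (N+1).toNat := by rw [hza, Array.size_replicate]
    rw [pvKstep (PySem.List.pyRange 1 (N+1) 1) a N m hk hrow (by omega)
      (fun n hn => by
        have := (PySem.List.mem_pyRange_one).mp hn
        constructor
        · omega
        · omega)]
    rw [hza]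
    have hpure : (PySem.List.pyRange 1 (N+1) 1).foldl
        (fun r n => r.setIfInBounds n.toNat (pvDF (m.getD (a-1).toNat #[]) n (r.getD n.toNat 0)))
        (Array.replicate (N+1).toNat 0) = pvRowN N (m.getD (a-1).toNat #[]) := rfl
    rw [hpure, hprev]
    have hit : pvRowN N (pvIter N (a-2).toNat) = pvIter N ((a+1)-2).toNat := by
      have h : ((a+1)-2).toNat = (a-2).toNat + 1 := by omega
      rw [h]
      rfl
    rw [hit]
    refine ih (a+1) (by omega) (by omega) (by omega) _ (by rw [Array.size_setIfInBounds]; exact hlen) ?_ ?_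
    · have h1 : ((a+1)-1).toNat = a.toNat := by omega
      rw [h1, pvGetD_set_self _ _ _ _ hk]
    · intro j hj1 hj2
      rw [pvGetD_set_ne _ _ _ _ _ (by omega : a.toNat ≠ j.toNat)]
      exact hz j (by omega) hj2

theorem pvMain (N K : Int) (h : 1 ≤ K ∨ (K = 0 ∧ N ≤ 0)) :
    count_seqs N K = count_seqs_alt N K := by
  rcases h with hK | ⟨hK, hN⟩
  · -- K ≥ 1
    simp only [count_seqs, count_seqs_alt]
    have hlen0 : (Array.replicate (K+1).toNat (Array.replicate (N+1).toNat (0:Int))).size = (K+1).toNat :=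
      Array.size_replicate
    have h1len : 1 < (Array.replicate (K+1).toNat (Array.replicate (N+1).toNat (0:Int))).size := by
      rw [hlen0]; omega
    rw [pvInit _ _ h1len]
    have hg1 : (Array.replicate (K+1).toNat (Array.replicate (N+1).toNat (0:Int))).getD 1 #[]
        = Array.replicate (N+1).toNat (0:Int) := by
      rw [pvAGetD_eq, Array.getElem?_replicate, if_pos (show 1 < (K+1).toNat by omega)]
      rfl
    rw [hg1]
    have hrow1 : (PySem.List.pyRange 1 (N+1) 1).foldl (fun r n => r.setIfInBounds n.toNat 1)
        (Array.replicate (N+1).toNat 0) = pvRow1 N := rfl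
    rw [hrow1]
    have hA := pvLoopA N K (K-1).toNat 2 (by omega) (by omega) (by omega)
      ((Array.replicate (K+1).toNat (Array.replicate (N+1).toNat (0:Int))).setIfInBounds 1 (pvRow1 N))
      (by rw [Array.size_setIfInBounds]; exact hlen0)
      (by
        have h21 : ((2:Int)-1).toNat = 1 := rfl
        rw [h21, pvGetD_set_self _ _ _ _ h1len]
        rfl)
      (by
        intro j hj1 hj2
        rw [pvGetD_set_ne _ _ _ _ _ (by omega : 1 ≠ j.toNat)]
        rw [pvAGetD_eq, Array.getElem?_replicate, if_pos (show j.toNat < (K+1).toNat by omega)]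
        rfl)
    rw [hA]
    have hB := pvLoopB N K (K-1).toNat 2 (by omega) (by omega) (by omega)
    have h22 : ((2:Int)-2).toNat = 0 := rfl
    rw [h22] at hB
    have hB' : (PySem.List.pyRange 2 (K+1) 1).foldl (fun c (_k : Int) =>
        (PySem.List.pyRange 1 (N+1) 1).foldl (fun nw d =>
          (PySem.List.pyRange d (N+1) d).foldl (fun nw m =>
            nw.setIfInBounds m.toNat (PySem.Int.mod (nw.getD m.toNat 0 + c.getD d.toNat 0) (10 ^ 9 + 7))) nw)
          (Array.replicate (N+1).toNat 0)) (pvRow1 N)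
        = pvIter N (K-1).toNat := hB
    rw [hB']
  · -- K = 0, N ≤ 0: all loops are empty and both results are (sum of a zero row) % MOD
    subst hK
    have e1 : PySem.List.pyRange 1 (N+1) 1 = [] := PySem.List.pyRange_one_eq_nil (by omega)
    have e2 : PySem.List.pyRange 2 ((0:Int)+1) 1 = [] := PySem.List.pyRange_one_eq_nil (by omega)
    simp only [count_seqs, count_seqs_alt, e1, e2, List.foldl_nil]
    have hg : (Array.replicate ((0:Int)+1).toNat (Array.replicate (N+1).toNat (0:Int))).getD (0:Int).toNat #[]
        = Array.replicate (N+1).toNat (0:Int) := rfl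
    rw [hg]

-- ===== VERDICT (by name: the statement is the Claim_ definition above) =====
theorem count_seqs_spec : Claim_equal_count_seqs := by
  intro N K _hDom hPre
  unfold Spec_count_seqs
  exact pvMain N K hPre
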